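-- pv_equiv track=rewrite | github.com/deboursacp/aoc2024 | day17/2.py | solve
-- ===== SOURCE A (Python) =====
-- class Computer:
--     def __init__(self, a: int, b: int, c: int, program: list[int]):
--         self.RegA = a
--         self.RegB = b
--         self.RegC = c
--         self.program = program
--         self.ip = 0
--         self.output = []
--
--     def run(self):
--         while 0 <= self.ip < len(self.program):
--             self.tick()
--         return self
--
--     def tick(self):
--         if self.op_code == 0:
--             self.RegA = self.RegA >> self.operand
--         elif self.op_code == 1:
--             self.RegB = self.RegB ^ self.operand
--         elif self.op_code == 2:
--             self.RegB = self.operand % 8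
--         elif self.op_code == 3 and self.RegA != 0:
--             self.ip = self.operand
--             return  # Return early so we don't increment IP.
--         elif self.op_code == 4:
--             self.RegB = self.RegB ^ self.RegC
--         elif self.op_code == 5:
--             self.output.append(self.operand % 8)
--         elif self.op_code == 6:
--             self.RegB = self.RegA >> self.operand
--         elif self.op_code == 7:
--             self.RegC = self.RegA >> self.operand
--
--         self.ip += 2
--
--     @property
--     def op_code(self):
--         return self.program[self.ip]
--
--     @property
--     def operand(self) -> int:
--         operand = self.program[self.ip + 1]
--         if self.op_code in {1, 3}:  # The only opcodes that don't use Combo Operand.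
--             return operand
--         if operand <= 3:
--             return operand
--         if operand == 4:
--             return self.RegA
--         if operand == 5:
--             return self.RegB
--         if operand == 6:
--             return self.RegC
--
-- PROGRAM = [2, 4, 1, 1, 7, 5, 1, 5, 4, 0, 0, 3, 5, 5, 3, 0]
--
-- def solve(reversed_program: list[int], depth: int = 0, a: int = 0):
--     # Finds the viable 3 bits values that produce the output at memory_pos given the prefix of a.
--     if depth == len(reversed_program):
--         # We've fully matched the program.
--         return a
--     for i in range(8):
--         # By iterating in ascending order, we ensure that we explore the smallest value first (we start at the msb).
--         new_a = (a << 3) + i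
--         if Computer(new_a, 0, 0, PROGRAM).run().output[0] == reversed_program[depth]:
--             maybe_match = solve(reversed_program, depth + 1, new_a)
--             if maybe_match:
--                 return maybe_match
-- ===== SOURCE B (Python) =====
-- # B: same DFS over 3-bit digits, but the Computer VM is replaced by the closed-form
-- # first output of the fixed PROGRAM: out0(A) = (((A%8)^1) ^ 5 ^ (A >> ((A%8)^1))) % 8.
-- def solve(reversed_program: list[int], depth: int = 0, a: int = 0):
--     if depth == len(reversed_program):
--         return a
--     for i in range(8):
--         new_a = (a << 3) + i
--         b = (new_a % 8) ^ 1
--         if ((b ^ 5) ^ (new_a >> b)) % 8 == reversed_program[depth]: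
--             maybe_match = solve(reversed_program, depth + 1, new_a)
--             if maybe_match:
--                 return maybe_match
-- ===== Notes on version B (the rewrite author's own statement) =====
-- stated objective: simpler
-- what changed: B deletes the Computer opcode-interpreter (VM) entirely and validates each 3-bit digit with the closed-form first output of the fixed PROGRAM, (((new_a%8)^1)^5 ^ (new_a>>((new_a%8)^1))) % 8, keeping the DFS identical.
import Mathlib
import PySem

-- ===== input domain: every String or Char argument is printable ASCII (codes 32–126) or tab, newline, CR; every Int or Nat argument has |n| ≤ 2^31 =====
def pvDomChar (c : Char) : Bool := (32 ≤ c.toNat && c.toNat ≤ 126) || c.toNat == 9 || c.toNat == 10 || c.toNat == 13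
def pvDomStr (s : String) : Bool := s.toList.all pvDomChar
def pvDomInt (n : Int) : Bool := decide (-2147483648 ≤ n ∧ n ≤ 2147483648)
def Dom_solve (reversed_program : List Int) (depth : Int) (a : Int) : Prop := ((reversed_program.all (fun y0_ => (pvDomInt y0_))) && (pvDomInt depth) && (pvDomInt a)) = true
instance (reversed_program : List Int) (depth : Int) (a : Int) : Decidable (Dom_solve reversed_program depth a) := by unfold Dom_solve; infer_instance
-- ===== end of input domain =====

-- B replaces A's opcode-interpreter (Computer VM) by the closed-form first output of the
-- fixed PROGRAM_A, keeping the DFS over 3-bit digits identical; objective: simpler.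

-- ===== PORT A =====
structure VMState where
  RegA : Int
  RegB : Int
  RegC : Int
  program : List Int
  ip : Int
  output : List Int

-- self.program[self.ip]; the while-loop guard keeps ip in range, getD 0 is only a totality guard
def vmOpCode (c : VMState) : Int := (PySem.List.pyGet? c.program c.ip).getD 0

-- Computer.vmOperand; Python returns None on combo vmOperand 7 (never occurs in PROGRAM_A): 0 is a totality guard
def vmOperand (c : VMState) : Int :=
  let w := (PySem.List.pyGet? c.program (c.ip + 1)).getD 0
  if vmOpCode c == 1 || vmOpCode c == 3 then w
  else if w ≤ 3 then w
  else if w == 4 then c.RegA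
  else if w == 5 then c.RegB
  else if w == 6 then c.RegC
  else 0

-- Computer.vmTick; Python's '>>' is '>>>' (shift counts here are always ≥ 0, so .toNat is exact)
def vmTick (c : VMState) : VMState :=
  if vmOpCode c == 0 then { c with RegA := c.RegA >>> (vmOperand c).toNat, ip := c.ip + 2 }
  else if vmOpCode c == 1 then { c with RegB := PySem.Int.bxor c.RegB (vmOperand c), ip := c.ip + 2 }
  else if vmOpCode c == 2 then { c with RegB := PySem.Int.mod (vmOperand c) 8, ip := c.ip + 2 }
  else if vmOpCode c == 3 && c.RegA != 0 then { c with ip := vmOperand c }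
  else if vmOpCode c == 4 then { c with RegB := PySem.Int.bxor c.RegB c.RegC, ip := c.ip + 2 }
  else if vmOpCode c == 5 then { c with output := c.output ++ [PySem.Int.mod (vmOperand c) 8], ip := c.ip + 2 }
  else if vmOpCode c == 6 then { c with RegB := c.RegA >>> (vmOperand c).toNat, ip := c.ip + 2 }
  else if vmOpCode c == 7 then { c with RegC := c.RegA >>> (vmOperand c).toNat, ip := c.ip + 2 }
  else { c with ip := c.ip + 2 }

-- Computer.run: 'while 0 <= ip < len(program)'; fuel only makes the loop total —
-- 8*(|A|+1) ticks always suffice for PROGRAM_A started at register A ≥ 0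
def runVM : Nat → VMState → VMState
  | 0, c => c
  | n+1, c => if 0 ≤ c.ip ∧ c.ip < (c.program.length : Int) then runVM n (vmTick c) else c

def PROGRAM_A : List Int := [2, 4, 1, 1, 7, 5, 1, 5, 4, 0, 0, 3, 5, 5, 3, 0]

-- the 'for i in range(8)' loop with early return; 'go' is the recursive call at depth+1;
-- 'if maybe_match:' is 'm ≠ 0' on some m
def solveLoopA (go : List Int → Int → Int → Option Int) (rp : List Int) (depth a : Int) :
    List Int → Option Int
  | [] => none
  | i :: rest =>
    let new_a := (a <<< (3:Nat)) + i
    let comp := runVM (8 * (new_a.toNat + 1)) ⟨new_a, 0, 0, PROGRAM_A, 0, []⟩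
    if PySem.List.pyGet? comp.output 0 == PySem.List.pyGet? rp depth then
      match go rp (depth + 1) new_a with
      | some m => if m ≠ 0 then some m else solveLoopA go rp depth a rest
      | none => solveLoopA go rp depth a rest
    else solveLoopA go rp depth a rest

-- solve's body; fuel (len - depth)+1 only makes the recursion total (exact under Pre_solve)
def solveGoA : Nat → List Int → Int → Int → Option Int
  | 0, _, _, _ => none
  | n+1, rp, depth, a =>
    if depth == (rp.length : Int) then some a
    else solveLoopA (solveGoA n) rp depth a (PySem.List.pyRange 0 8 1)

def solve (reversed_program : List Int) (depth : Int) (a : Int) : Option Int :=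
  solveGoA (((reversed_program.length : Int) - depth).toNat + 1) reversed_program depth a

-- ===== PORT B =====
def solveLoopB (go : List Int → Int → Int → Option Int) (rp : List Int) (depth a : Int) :
    List Int → Option Int
  | [] => none
  | i :: rest =>
    let new_a := (a <<< (3:Nat)) + i
    let b := PySem.Int.bxor (PySem.Int.mod new_a 8) 1
    if (some (PySem.Int.mod (PySem.Int.bxor (PySem.Int.bxor b 5) (new_a >>> b.toNat)) 8) : Option Int)
        == PySem.List.pyGet? rp depth then
      match go rp (depth + 1) new_a with
      | some m => if m ≠ 0 then some m else solveLoopB go rp depth a rest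
      | none => solveLoopB go rp depth a rest
    else solveLoopB go rp depth a rest

def solveGoB : Nat → List Int → Int → Int → Option Int
  | 0, _, _, _ => none
  | n+1, rp, depth, a =>
    if depth == (rp.length : Int) then some a
    else solveLoopB (solveGoB n) rp depth a (PySem.List.pyRange 0 8 1)

def solve_alt (reversed_program : List Int) (depth : Int) (a : Int) : Option Int :=
  solveGoB (((reversed_program.length : Int) - depth).toNat + 1) reversed_program depth a

-- ===== PRECONDITION & SPEC =====
-- Pre_solve excludes exactly the inputs where the Python A does not return: a < 0 with depth < len
-- makes Computer.run loop forever (a negative register never shifts to 0), and |depth| > len raises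
-- IndexError at reversed_program[depth]; on every input A returns on, Pre_solve holds.
def Pre_solve (reversed_program : List Int) (depth : Int) (a : Int) : Prop :=
  (-(reversed_program.length : Int) ≤ depth ∧ depth ≤ (reversed_program.length : Int)) ∧
  (depth = (reversed_program.length : Int) ∨ 0 ≤ a)
instance (reversed_program : List Int) (depth : Int) (a : Int) : Decidable (Pre_solve reversed_program depth a) := by unfold Pre_solve; infer_instance

def pvWitness_solve : List Int × Int × Int := ([4, 0, 5], 0, 0)

def Spec_solve (reversed_program : List Int) (depth : Int) (a : Int) (out : Option Int) : Prop := out = solve_alt reversed_program depth a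
instance (reversed_program : List Int) (depth : Int) (a : Int) (out : Option Int) : Decidable (Spec_solve reversed_program depth a out) := by unfold Spec_solve; infer_instance

-- ===== CLAIM (what is proved, stated in full; the proofs are below) =====
def Claim_equal_solve : Prop := ∀ (reversed_program : List Int) (depth : Int) (a : Int), Dom_solve reversed_program depth a → Pre_solve reversed_program depth a → Spec_solve reversed_program depth a (solve reversed_program depth a)

-- ===== LEMMAS AND PROOFS =====

-- one guarded step of the while loop
theorem runVM_succ (n : Nat) (c : VMState) (h : 0 ≤ c.ip ∧ c.ip < (c.program.length : Int)) :
    runVM (n+1) c = runVM n (vmTick c) := by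
  simp [runVM, h]

-- vmTick only ever appends to output
theorem tick_output (c : VMState) : ∃ t, (vmTick c).output = c.output ++ t := by
  unfold vmTick
  split_ifs <;> first | exact ⟨_, rfl⟩ | exact ⟨[], by simp⟩

-- hence the whole run only appends to output
theorem runVM_output (n : Nat) (c : VMState) : ∃ t, (runVM n c).output = c.output ++ t := by
  induction n generalizing c with
  | zero => exact ⟨[], by simp [runVM]⟩
  | succ n ih =>
    unfold runVM
    split
    · obtain ⟨t1, h1⟩ := tick_output c
      obtain ⟨t2, h2⟩ := ih (vmTick c)
      exact ⟨t1 ++ t2, by rw [h2, h1, List.append_assoc]⟩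
    · exact ⟨[], by simp⟩

-- the first seven ticks of PROGRAM_A from ⟨A,0,0⟩: B=A%8; B^=1; C=A>>B; B^=5; B^=C; A>>=3; output B%8
theorem runVM_seven (A : Int) (n : Nat) :
    runVM (n + 8) (⟨A, 0, 0, PROGRAM_A, 0, []⟩) = runVM (n + 1) (⟨A >>> (3:Int).toNat, PySem.Int.bxor (PySem.Int.bxor (PySem.Int.bxor (PySem.Int.mod A 8) 1) 5) (A >>> (PySem.Int.bxor (PySem.Int.mod A 8) 1).toNat), A >>> (PySem.Int.bxor (PySem.Int.mod A 8) 1).toNat, PROGRAM_A, 14, [PySem.Int.mod (PySem.Int.bxor (PySem.Int.bxor (PySem.Int.bxor (PySem.Int.mod A 8) 1) 5) (A >>> (PySem.Int.bxor (PySem.Int.mod A 8) 1).toNat)) 8]⟩) := by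
  calc runVM (n + 8) (⟨A, 0, 0, PROGRAM_A, 0, []⟩)
      = runVM ((n + 7) + 1) (⟨A, 0, 0, PROGRAM_A, 0, []⟩) := rfl
    _ = runVM (n + 7) (⟨A, PySem.Int.mod A 8, 0, PROGRAM_A, 2, []⟩) := by
          rw [runVM_succ _ _ ⟨by simp, by simp [PROGRAM_A]⟩]; rfl
    _ = runVM (n + 6) (⟨A, PySem.Int.bxor (PySem.Int.mod A 8) 1, 0, PROGRAM_A, 4, []⟩) := by
          rw [runVM_succ _ _ ⟨by simp, by simp [PROGRAM_A]⟩]; rfl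
    _ = runVM (n + 5) (⟨A, PySem.Int.bxor (PySem.Int.mod A 8) 1, A >>> (PySem.Int.bxor (PySem.Int.mod A 8) 1).toNat, PROGRAM_A, 6, []⟩) := by
          rw [runVM_succ _ _ ⟨by simp, by simp [PROGRAM_A]⟩]; rfl
    _ = runVM (n + 4) (⟨A, PySem.Int.bxor (PySem.Int.bxor (PySem.Int.mod A 8) 1) 5, A >>> (PySem.Int.bxor (PySem.Int.mod A 8) 1).toNat, PROGRAM_A, 8, []⟩) := by
          rw [runVM_succ _ _ ⟨by simp, by simp [PROGRAM_A]⟩]; rfl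
    _ = runVM (n + 3) (⟨A, PySem.Int.bxor (PySem.Int.bxor (PySem.Int.bxor (PySem.Int.mod A 8) 1) 5) (A >>> (PySem.Int.bxor (PySem.Int.mod A 8) 1).toNat), A >>> (PySem.Int.bxor (PySem.Int.mod A 8) 1).toNat, PROGRAM_A, 10, []⟩) := by
          rw [runVM_succ _ _ ⟨by simp, by simp [PROGRAM_A]⟩]; rfl
    _ = runVM (n + 2) (⟨A >>> (3:Int).toNat, PySem.Int.bxor (PySem.Int.bxor (PySem.Int.bxor (PySem.Int.mod A 8) 1) 5) (A >>> (PySem.Int.bxor (PySem.Int.mod A 8) 1).toNat), A >>> (PySem.Int.bxor (PySem.Int.mod A 8) 1).toNat, PROGRAM_A, 12, []⟩) := by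
          rw [runVM_succ _ _ ⟨by simp, by simp [PROGRAM_A]⟩]; rfl
    _ = runVM (n + 1) (⟨A >>> (3:Int).toNat, PySem.Int.bxor (PySem.Int.bxor (PySem.Int.bxor (PySem.Int.mod A 8) 1) 5) (A >>> (PySem.Int.bxor (PySem.Int.mod A 8) 1).toNat), A >>> (PySem.Int.bxor (PySem.Int.mod A 8) 1).toNat, PROGRAM_A, 14, [PySem.Int.mod (PySem.Int.bxor (PySem.Int.bxor (PySem.Int.bxor (PySem.Int.mod A 8) 1) 5) (A >>> (PySem.Int.bxor (PySem.Int.mod A 8) 1).toNat)) 8]⟩) := by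
          rw [runVM_succ _ _ ⟨by simp, by simp [PROGRAM_A]⟩]; rfl

-- the first element of the run's output is the closed-form digit B uses
theorem vm_first (A : Int) :
    PySem.List.pyGet? (runVM (8 * (A.toNat + 1)) ⟨A, 0, 0, PROGRAM_A, 0, []⟩).output 0 =
    some (PySem.Int.mod
      (PySem.Int.bxor (PySem.Int.bxor (PySem.Int.bxor (PySem.Int.mod A 8) 1) 5)
        (A >>> (PySem.Int.bxor (PySem.Int.mod A 8) 1).toNat)) 8) := by
  have h8 : 8 * (A.toNat + 1) = 8 * A.toNat + 8 := by ring
  rw [h8, runVM_seven]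
  obtain ⟨t, ht⟩ := runVM_output (8 * A.toNat + 1) _
  rw [ht]
  simp

-- the loop bodies agree whenever their recursive continuations agree
theorem loop_eq (goA goB : List Int → Int → Int → Option Int)
    (hgo : ∀ rp depth a, goA rp depth a = goB rp depth a)
    (rp : List Int) (depth a : Int) (l : List Int) :
    solveLoopA goA rp depth a l = solveLoopB goB rp depth a l := by
  induction l with
  | nil => rfl
  | cons i rest ih =>
    simp only [solveLoopA, solveLoopB, vm_first, hgo, ih]

-- the two DFSs are pointwise equal
theorem go_eq (n : Nat) (rp : List Int) (depth a : Int) :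
    solveGoA n rp depth a = solveGoB n rp depth a := by
  induction n generalizing rp depth a with
  | zero => rfl
  | succ n ih =>
    simp only [solveGoA, solveGoB]
    split
    · rfl
    · exact loop_eq _ _ ih rp depth a _

-- ===== VERDICT (by name: the statement is the Claim_ definition above) =====
theorem solve_spec : Claim_equal_solve := by
  intro rp depth a _ _
  unfold Spec_solve solve solve_alt
  exact go_eq _ rp depth a
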